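-- pv_equiv track=rewrite | github.com/SharkoStepan/AOIS | lab3/minimizer.py | find_karnaugh_groups
-- ===== SOURCE A (Python) =====
-- from typing import List, Tuple, Set
--
-- def find_karnaugh_groups(k_map: List[List[int]]) -> List[Tuple[int, int, int, int]]:
--     rows = len(k_map)
--     if rows == 0:
--         return []
--     cols = len(k_map[0])
--     groups = []
--
--     for i1 in range(rows):
--         for j1 in range(cols):
--             if k_map[i1][j1] == 1:
--                 for i2 in range(i1, rows):
--                     for j2 in range(j1, cols):
--                         all_ones = True
--                         for i in range(i1, i2 + 1):
--                             for j in range(j1, j2 + 1):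
--                                 if k_map[i % rows][j % cols] != 1:
--                                     all_ones = False
--                                     break
--                             if not all_ones:
--                                 break
--
--                         if all_ones:
--                             group_size = (i2 - i1 + 1) * (j2 - j1 + 1)
--                             if (group_size & (group_size - 1)) == 0:
--                                 groups.append((i1, j1, i2, j2))
--
--     final_groups = []
--     for group in groups:
--         i1, j1, i2, j2 = group
--         is_maximal = True
--         for other in groups:
--             oi1, oj1, oi2, oj2 = other
--             if (i1 >= oi1 and j1 >= oj1 and i2 <= oi2 and j2 <= oj2 and
--                     (i1 != oi1 or j1 != oj1 or i2 != oi2 or j2 != oj2)):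
--                 is_maximal = False
--                 break
--         if is_maximal:
--             final_groups.append(group)
--
--     return final_groups
-- ===== SOURCE B (Python) =====
-- from typing import List, Tuple
--
-- def find_karnaugh_groups(k_map: List[List[int]]) -> List[Tuple[int, int, int, int]]:
--     rows = len(k_map)
--     if rows == 0:
--         return []
--     cols = len(k_map[0])
--
--     # reach[i][j] = number of consecutive 1-cells of row i starting at column j
--     reach = []
--     for row in k_map:
--         r = []
--         run = 0
--         for v in reversed(row[:cols]):
--             run = run + 1 if v == 1 else 0
--             r.append(run)
--         r.reverse()
--         reach.append(r)
--
--     groups = []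
--     for i1 in range(rows):
--         for j1 in range(cols):
--             m = cols
--             for i2 in range(i1, rows):
--                 m = min(m, reach[i2][j1])
--                 if m == 0:
--                     break
--                 for j2 in range(j1, j1 + m):
--                     size = (i2 - i1 + 1) * (j2 - j1 + 1)
--                     if size & (size - 1) == 0:
--                         groups.append((i1, j1, i2, j2))
--
--     final_groups = []
--     for g in groups:
--         i1, j1, i2, j2 = g
--         for o in groups:
--             if o[0] <= i1 and o[1] <= j1 and i2 <= o[2] and j2 <= o[3] and o != g:
--                 break
--         else:
--             final_groups.append(g)
--     return final_groups
-- ===== Notes on version B (the rewrite author's own statement) =====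
-- stated objective: alternative
-- what changed: B precomputes per-row run lengths of consecutive 1s and keeps an incremental column-wise minimum (with early break), so each all-ones rectangle test is O(1) instead of A's O(area) rescan; on 1-free maps both are linear and B's precomputation is overhead, so no overall speed is claimed.
import Mathlib
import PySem

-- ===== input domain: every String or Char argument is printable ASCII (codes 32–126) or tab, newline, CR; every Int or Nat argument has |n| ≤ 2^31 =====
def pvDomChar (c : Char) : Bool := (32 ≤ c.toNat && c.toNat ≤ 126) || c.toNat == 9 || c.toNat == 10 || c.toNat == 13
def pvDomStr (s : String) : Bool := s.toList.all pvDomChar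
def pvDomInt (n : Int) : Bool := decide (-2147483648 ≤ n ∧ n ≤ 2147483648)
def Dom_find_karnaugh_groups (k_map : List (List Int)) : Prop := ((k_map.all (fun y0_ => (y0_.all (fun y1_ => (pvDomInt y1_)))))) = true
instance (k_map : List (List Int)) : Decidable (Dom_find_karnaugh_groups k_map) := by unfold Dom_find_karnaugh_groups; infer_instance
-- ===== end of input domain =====

-- B replaces A's per-rectangle full rescans by per-row run lengths of consecutive 1s and an
-- incremental column-wise minimum, enumerating exactly the all-ones rectangles (objective: alternative).

-- ===== PORT A =====
-- xs[i] where under Pre_ every index used is in range, so the default is never taken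
def pvCellA (k_map : List (List Int)) (i j : Int) : Int :=
  PySem.List.pyGetD (PySem.List.pyGetD k_map i []) j 0

def pvAJ2Body (k_map : List (List Int)) (rows cols i1 j1 i2 : Int)
    (acc : List (Int × Int × Int × Int)) (j2 : Int) : List (Int × Int × Int × Int) :=
  let all_ones :=
    (PySem.List.pyRange i1 (i2 + 1) 1).all (fun i =>
      (PySem.List.pyRange j1 (j2 + 1) 1).all (fun j =>
        pvCellA k_map (PySem.Int.mod i rows) (PySem.Int.mod j cols) == 1))
  if all_ones then
    let group_size := (i2 - i1 + 1) * (j2 - j1 + 1)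
    if PySem.Int.band group_size (group_size - 1) == 0 then
      acc ++ [(i1, j1, i2, j2)]
    else acc
  else acc

def pvAI2Body (k_map : List (List Int)) (rows cols i1 j1 : Int)
    (acc : List (Int × Int × Int × Int)) (i2 : Int) : List (Int × Int × Int × Int) :=
  (PySem.List.pyRange j1 cols 1).foldl (pvAJ2Body k_map rows cols i1 j1 i2) acc

def pvAJ1Body (k_map : List (List Int)) (rows cols i1 : Int)
    (acc : List (Int × Int × Int × Int)) (j1 : Int) : List (Int × Int × Int × Int) :=
  if pvCellA k_map i1 j1 == 1 then
    (PySem.List.pyRange i1 rows 1).foldl (pvAI2Body k_map rows cols i1 j1) acc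
  else acc

def find_karnaugh_groups (k_map : List (List Int)) : List (Int × Int × Int × Int) :=
  let rows : Int := (k_map.length : Int)
  if rows == 0 then []
  else
    let cols : Int := ((PySem.List.pyGetD k_map 0 []).length : Int)
    let groups : List (Int × Int × Int × Int) :=
      (PySem.List.pyRange 0 rows 1).foldl (fun acc i1 =>
        (PySem.List.pyRange 0 cols 1).foldl (pvAJ1Body k_map rows cols i1) acc) []
    groups.foldl (fun acc g =>
      let is_maximal := !(groups.any (fun o =>
        decide (g.1 ≥ o.1) && decide (g.2.1 ≥ o.2.1) && decide (g.2.2.1 ≤ o.2.2.1) &&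
        decide (g.2.2.2 ≤ o.2.2.2) &&
        (g.1 != o.1 || g.2.1 != o.2.1 || g.2.2.1 != o.2.2.1 || g.2.2.2 != o.2.2.2)))
      if is_maximal then acc ++ [g] else acc) []

-- ===== PORT B =====
-- run = run + 1 if v == 1 else 0; r.append(run) over reversed(row[:cols]); then r.reverse()
def pvReachRow (row : List Int) (cols : Int) : List Int :=
  (((PySem.List.slice row none (some cols)).reverse.foldl
      (fun (s : Int × List Int) v =>
        let run := if v == 1 then s.1 + 1 else 0
        (run, s.2 ++ [run])) ((0 : Int), ([] : List Int))).2).reverse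

def pvBJ2Body (i1 j1 i2 : Int) (acc : List (Int × Int × Int × Int)) (j2 : Int) :
    List (Int × Int × Int × Int) :=
  let size := (i2 - i1 + 1) * (j2 - j1 + 1)
  if PySem.Int.band size (size - 1) == 0 then acc ++ [(i1, j1, i2, j2)] else acc

-- the 'for i2 in range(i1, rows)' loop with its 'if m == 0: break'
def pvI2Loop (reach : List (List Int)) (i1 j1 : Int) (is2 : List Int) (m : Int)
    (acc : List (Int × Int × Int × Int)) : List (Int × Int × Int × Int) :=
  match is2 with
  | [] => acc
  | i2 :: rest =>
    let m := min m (PySem.List.pyGetD (PySem.List.pyGetD reach i2 []) j1 0)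
    if m == 0 then acc
    else
      pvI2Loop reach i1 j1 rest m
        ((PySem.List.pyRange j1 (j1 + m) 1).foldl (pvBJ2Body i1 j1 i2) acc)

def find_karnaugh_groups_alt (k_map : List (List Int)) : List (Int × Int × Int × Int) :=
  let rows : Int := (k_map.length : Int)
  if rows == 0 then []
  else
    let cols : Int := ((PySem.List.pyGetD k_map 0 []).length : Int)
    let reach := k_map.map (fun row => pvReachRow row cols)
    let groups : List (Int × Int × Int × Int) :=
      (PySem.List.pyRange 0 rows 1).foldl (fun acc i1 =>
        (PySem.List.pyRange 0 cols 1).foldl (fun acc j1 =>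
          pvI2Loop reach i1 j1 (PySem.List.pyRange i1 rows 1) cols acc) acc) []
    groups.foldl (fun acc g =>
      if groups.any (fun o =>
          decide (o.1 ≤ g.1) && decide (o.2.1 ≤ g.2.1) && decide (g.2.2.1 ≤ o.2.2.1) &&
          decide (g.2.2.2 ≤ o.2.2.2) && (o != g))
      then acc
      else acc ++ [g]) []

-- ===== PRECONDITION & SPEC =====
-- Pre_ excludes exactly the ragged maps in which some row is shorter than the first row:
-- Python A (and B) raise IndexError there.
def Pre_find_karnaugh_groups (k_map : List (List Int)) : Prop :=
  ∀ r ∈ k_map, (k_map.headD []).length ≤ r.length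
instance (k_map : List (List Int)) : Decidable (Pre_find_karnaugh_groups k_map) := by
  unfold Pre_find_karnaugh_groups; infer_instance

def pvWitness_find_karnaugh_groups : List (List Int) := [[1, 0], [1, 1]]

def Spec_find_karnaugh_groups (k_map : List (List Int)) (out : List (Int × Int × Int × Int)) : Prop := out = find_karnaugh_groups_alt k_map
instance (k_map : List (List Int)) (out : List (Int × Int × Int × Int)) : Decidable (Spec_find_karnaugh_groups k_map out) := by unfold Spec_find_karnaugh_groups; infer_instance

-- ===== CLAIM (what is proved, stated in full; the proofs are below) =====
def Claim_equal_find_karnaugh_groups : Prop := ∀ (k_map : List (List Int)), Dom_find_karnaugh_groups k_map → Pre_find_karnaugh_groups k_map → Spec_find_karnaugh_groups k_map (find_karnaugh_groups k_map)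

-- ===== LEMMAS AND PROOFS =====

-- number of consecutive 1s at the head of a list
def pvCnt : List Int → Nat
  | [] => 0
  | v :: t => if v = 1 then pvCnt t + 1 else 0

-- spec of B's run-length rows: head-run counts of all suffixes
def pvReachSpec : List Int → List Int
  | [] => []
  | v :: t => ((pvCnt (v :: t) : Int)) :: pvReachSpec t

-- cols of a map, and the count of consecutive 1s in (truncated) row i from column j
def pvC (k : List (List Int)) : Int := ((k.getD 0 []).length : Int)
def pvCntI (k : List (List Int)) (i j : Int) : Int :=
  (pvCnt (((k.getD i.toNat []).take (k.getD 0 []).length).drop j.toNat) : Int)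

lemma pvCnt_le_length (xs : List Int) : pvCnt xs ≤ xs.length := by
  induction xs with
  | nil => simp [pvCnt]
  | cons v t ih => by_cases h : v = 1 <;> simp [pvCnt, h] <;> omega

lemma pvCnt_iff (xs : List Int) (w : Nat) :
    w ≤ pvCnt xs ↔ (∀ t : Nat, t < w → xs.getD t 0 = 1) := by
  induction xs generalizing w with
  | nil =>
    constructor
    · intro h t ht; simp [pvCnt] at h; omega
    · intro h
      cases w with
      | zero => simp
      | succ w' => have := h 0 (by omega); simp at this
  | cons v t ih =>
    cases w with
    | zero => simp
    | succ w' =>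
      by_cases hv : v = 1
      · subst hv
        have hc : pvCnt (1 :: t) = pvCnt t + 1 := by simp [pvCnt]
        rw [hc, Nat.add_le_add_iff_right, ih]
        constructor
        · intro h s hs
          cases s with
          | zero => simp
          | succ s' => simpa using h s' (by omega)
        · intro h s hs; simpa using h (s + 1) (by omega)
      · simp only [pvCnt, if_neg hv]
        constructor
        · omega
        · intro h; exact absurd (by simpa using h 0 (by omega)) hv

lemma pvCnt_zero_of_head (xs : List Int) (h : xs.getD 0 0 ≠ 1) : pvCnt xs = 0 := by
  cases xs with
  | nil => rfl
  | cons v t => simp at h; simp [pvCnt, h]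

lemma pvGetD_dropTake (row : List Int) (cN jN t : Nat) (h : jN + t < cN) :
    ((row.take cN).drop jN).getD t 0 = row.getD (jN + t) 0 := by
  simp [List.getD_eq_getElem?_getD, List.getElem?_drop, List.getElem?_take, h]

lemma pvReachSpec_getD (xs : List Int) (t : Nat) :
    (pvReachSpec xs).getD t 0 = (pvCnt (xs.drop t) : Int) := by
  induction xs generalizing t with
  | nil => cases t <;> simp [pvReachSpec, pvCnt]
  | cons v xs ih =>
    cases t with
    | zero => simp [pvReachSpec]
    | succ t' => simpa [pvReachSpec] using ih t'

lemma pvReachFold (ys s : List Int) :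
    ys.foldl (fun (s : Int × List Int) v =>
        let run := if v == 1 then s.1 + 1 else 0
        (run, s.2 ++ [run])) ((pvCnt s : Int), (pvReachSpec s).reverse)
      = ((pvCnt (ys.reverse ++ s) : Int), (pvReachSpec (ys.reverse ++ s)).reverse) := by
  induction ys generalizing s with
  | nil => simp
  | cons y ys ih =>
    have hstep : ((fun (s : Int × List Int) v =>
        let run := if v == 1 then s.1 + 1 else 0
        (run, s.2 ++ [run])) ((pvCnt s : Int), (pvReachSpec s).reverse) y)
        = ((pvCnt (y :: s) : Int), (pvReachSpec (y :: s)).reverse) := by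
      by_cases hy : y = 1 <;> simp [pvCnt, pvReachSpec, hy]
    refine ((congrArg (fun z => List.foldl (fun (s : Int × List Int) v =>
        let run := if v == 1 then s.1 + 1 else 0
        (run, s.2 ++ [run])) z ys) hstep).trans ?_)
    rw [ih (y :: s)]
    simp

lemma pvReachRow_eq (row : List Int) (n : Nat) :
    pvReachRow row (n : Int) = pvReachSpec (row.take n) := by
  unfold pvReachRow
  rw [PySem.List.slice_to_natCast]
  have h0 : ((0 : Int), ([] : List Int)) = ((pvCnt [] : Int), (pvReachSpec []).reverse) := by
    simp [pvCnt, pvReachSpec]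
  rw [h0, pvReachFold]
  simp

lemma pvReach_lookup (k : List (List Int)) (i j : Int) (hi0 : 0 ≤ i)
    (hi : i < (k.length : Int)) (hj0 : 0 ≤ j) (hj : j < pvC k) :
    PySem.List.pyGetD (PySem.List.pyGetD (k.map (fun row => pvReachRow row (pvC k))) i []) j 0
      = pvCntI k i j := by
  have hiN : i.toNat < k.length := by omega
  rw [PySem.List.pyGetD_eq_getElem _ _ hi0 (by simpa using hi)]
  rw [List.getElem_map]
  unfold pvC
  rw [pvReachRow_eq]
  rw [PySem.List.pyGetD_of_nonneg _ _ hj0, pvReachSpec_getD]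
  unfold pvCntI
  rw [List.getD_eq_getElem _ _ hiN]

lemma pvCntI_le (k : List (List Int)) (i j : Int) (hj0 : 0 ≤ j) (hj : j < pvC k) :
    pvCntI k i j ≤ pvC k - j := by
  simp only [pvCntI, pvC] at hj ⊢
  have h := pvCnt_le_length (((k.getD i.toNat []).take (k.getD 0 []).length).drop j.toNat)
  rw [List.length_drop, List.length_take] at h
  omega

lemma pvMod_id (a b : Int) (h0 : 0 ≤ a) (h : a < b) : PySem.Int.mod a b = a := by
  rw [PySem.Int.mod_eq_emod_of_pos (by omega)]
  exact Int.emod_eq_of_lt h0 h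

lemma pvCellA_eq (k : List (List Int)) (i j : Int) (hi0 : 0 ≤ i) (hj0 : 0 ≤ j) :
    pvCellA k i j = (k.getD i.toNat []).getD j.toNat 0 := by
  unfold pvCellA
  rw [PySem.List.pyGetD_of_nonneg _ _ hi0, PySem.List.pyGetD_of_nonneg _ _ hj0]

lemma pvLe_foldl_min_iff (l : List Int) (f : Int → Int) (init w : Int) :
    w ≤ l.foldl (fun a i => min a (f i)) init ↔ w ≤ init ∧ ∀ i ∈ l, w ≤ f i := by
  induction l generalizing init with
  | nil => simp
  | cons x t ih => simp [List.foldl_cons, ih, le_min_iff]; tauto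

lemma pvRow_iff (row : List Int) (cN : Nat) (j1 j2 : Int) (h0 : 0 ≤ j1) (hj : j1 ≤ j2)
    (hc : j2 < (cN : Int)) :
    (∀ j : Int, j1 ≤ j → j < j2 + 1 → (row.getD j.toNat 0) = 1)
      ↔ (j2 - j1 + 1 ≤ (pvCnt ((row.take cN).drop j1.toNat) : Int)) := by
  have hcast : ∀ n : Nat, (j2 - j1 + 1 ≤ (n : Int)) ↔ ((j2 - j1 + 1).toNat ≤ n) := by
    intro n; omega
  rw [hcast, pvCnt_iff]
  constructor
  · intro h t ht
    rw [pvGetD_dropTake row cN j1.toNat t (by omega)]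
    have h2 : j1.toNat + t = (j1 + (t : Int)).toNat := by omega
    rw [h2]
    exact h (j1 + t) (by omega) (by omega)
  · intro h j hj1' hj2'
    have := h (j - j1).toNat (by omega)
    rw [pvGetD_dropTake row cN j1.toNat _ (by omega)] at this
    have h2 : j1.toNat + (j - j1).toNat = j.toNat := by omega
    rwa [h2] at this

lemma pvAllOnes_iff (k : List (List Int)) (i1 j1 i2 j2 : Int)
    (hi10 : 0 ≤ i1) (hi12 : i1 ≤ i2) (hi2 : i2 < (k.length : Int))
    (hj10 : 0 ≤ j1) (hj12 : j1 ≤ j2) (hj2 : j2 < pvC k) :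
    ((PySem.List.pyRange i1 (i2 + 1) 1).all (fun i =>
      (PySem.List.pyRange j1 (j2 + 1) 1).all (fun j =>
        pvCellA k (PySem.Int.mod i (k.length : Int)) (PySem.Int.mod j (pvC k)) == 1)) = true)
      ↔ (∀ i : Int, i1 ≤ i → i ≤ i2 → j2 - j1 + 1 ≤ pvCntI k i j1) := by
  have hj2' : j2 < ((k.getD 0 []).length : Int) := by simpa [pvC] using hj2
  simp only [List.all_eq_true, PySem.List.mem_pyRange_one, beq_iff_eq, and_imp]
  constructor
  · intro h i hi1 hi2'
    unfold pvCntI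
    rw [← pvRow_iff (k.getD i.toNat []) (k.getD 0 []).length j1 j2 hj10 hj12 hj2']
    intro j hjl hjr
    have hcell := h i hi1 (by omega) j hjl hjr
    rw [pvMod_id i _ (by omega) (by omega), pvMod_id j _ (by omega) (by omega),
      pvCellA_eq k i j (by omega) (by omega)] at hcell
    exact hcell
  · intro h i hi1 hi2' j hjl hjr
    rw [pvMod_id i _ (by omega) (by omega), pvMod_id j _ (by omega) (by omega),
      pvCellA_eq k i j (by omega) (by omega)]
    have hrow := h i hi1 (by omega)
    unfold pvCntI at hrow
    rw [← pvRow_iff (k.getD i.toNat []) (k.getD 0 []).length j1 j2 hj10 hj12 hj2'] at hrow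
    exact hrow j hjl hjr

lemma pvA_dead (k : List (List Int)) (i1 j1 i0 : Int) (is2 : List Int)
    (hi10 : 0 ≤ i1) (hj10 : 0 ≤ j1) (hj1c : j1 < pvC k)
    (hbound : ∀ i2 ∈ is2, i1 ≤ i2 ∧ i2 < (k.length : Int))
    (hi0 : i1 ≤ i0) (hi0le : ∀ i2 ∈ is2, i0 ≤ i2) (hz : pvCntI k i0 j1 = 0) :
    ∀ acc, is2.foldl (pvAI2Body k (k.length : Int) (pvC k) i1 j1) acc = acc := by
  intro acc
  have houter : ∀ (acc : List (Int × Int × Int × Int)), ∀ i2 ∈ is2,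
      pvAI2Body k (k.length : Int) (pvC k) i1 j1 acc i2 = acc := by
    intro acc i2 hmem
    obtain ⟨hi12, hi2R⟩ := hbound i2 hmem
    unfold pvAI2Body
    have hin : ∀ (acc : List (Int × Int × Int × Int)), ∀ j2 ∈ PySem.List.pyRange j1 (pvC k) 1,
        pvAJ2Body k (k.length : Int) (pvC k) i1 j1 i2 acc j2 = acc := by
      intro acc j2 hj2mem
      rw [PySem.List.mem_pyRange_one] at hj2mem
      cases hX : (PySem.List.pyRange i1 (i2 + 1) 1).all (fun i =>
          (PySem.List.pyRange j1 (j2 + 1) 1).all (fun j =>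
            pvCellA k (PySem.Int.mod i (k.length : Int)) (PySem.Int.mod j (pvC k)) == 1)) with
      | false => simp [pvAJ2Body, hX]
      | true =>
        exfalso
        rw [pvAllOnes_iff k i1 j1 i2 j2 hi10 hi12 hi2R hj10 hj2mem.1 hj2mem.2] at hX
        have := hX i0 hi0 (hi0le i2 hmem)
        rw [hz] at this
        omega
    rw [PySem.List.foldl_congr_mem _ _ (fun acc _ => acc) _ (by intro a x hx; exact hin a x hx),
      PySem.List.foldl_ignore]
  rw [PySem.List.foldl_congr_mem _ _ (fun acc _ => acc) _ (by intro a x hx; exact houter a x hx),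
    PySem.List.foldl_ignore]

lemma pvJ2Fold_eq (k : List (List Int)) (i1 j1 i2 m : Int)
    (hi10 : 0 ≤ i1) (hi12 : i1 ≤ i2) (hi2 : i2 < (k.length : Int))
    (hj10 : 0 ≤ j1) (hj1c : j1 < pvC k)
    (hm : m = (PySem.List.pyRange i1 (i2 + 1) 1).foldl
        (fun a i => min a (pvCntI k i j1)) (pvC k))
    (hmpos : 0 < m) :
    ∀ acc, (PySem.List.pyRange j1 (pvC k) 1).foldl (pvAJ2Body k (k.length : Int) (pvC k) i1 j1 i2) acc
      = (PySem.List.pyRange j1 (j1 + m) 1).foldl (pvBJ2Body i1 j1 i2) acc := by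
  intro acc
  have hmins := (pvLe_foldl_min_iff (PySem.List.pyRange i1 (i2 + 1) 1)
    (fun i => pvCntI k i j1) (pvC k) m).mp (le_of_eq hm)
  have hmle : m ≤ pvC k - j1 := by
    have h1 : m ≤ pvCntI k i2 j1 :=
      hmins.2 i2 (by rw [PySem.List.mem_pyRange_one]; omega)
    have h2 := pvCntI_le k i2 j1 hj10 hj1c
    omega
  rw [PySem.List.pyRange_one_append j1 (j1 + m) (pvC k) (by omega) (by omega), List.foldl_append]
  have hfirst : ∀ (acc : List (Int × Int × Int × Int)),
      (PySem.List.pyRange j1 (j1 + m) 1).foldl (pvAJ2Body k (k.length : Int) (pvC k) i1 j1 i2) acc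
        = (PySem.List.pyRange j1 (j1 + m) 1).foldl (pvBJ2Body i1 j1 i2) acc := by
    intro acc
    apply PySem.List.foldl_congr_mem
    intro acc j2 hmem
    rw [PySem.List.mem_pyRange_one] at hmem
    have htrue : (PySem.List.pyRange i1 (i2 + 1) 1).all (fun i =>
        (PySem.List.pyRange j1 (j2 + 1) 1).all (fun j =>
          pvCellA k (PySem.Int.mod i (k.length : Int)) (PySem.Int.mod j (pvC k)) == 1)) = true := by
      rw [pvAllOnes_iff k i1 j1 i2 j2 hi10 hi12 hi2 hj10 (by omega) (by omega)]
      intro i hi1' hi2'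
      have hle : m ≤ pvCntI k i j1 :=
        hmins.2 i (by rw [PySem.List.mem_pyRange_one]; omega)
      omega
    simp [pvAJ2Body, pvBJ2Body, htrue]
  have hsecond : ∀ (acc : List (Int × Int × Int × Int)),
      (PySem.List.pyRange (j1 + m) (pvC k) 1).foldl (pvAJ2Body k (k.length : Int) (pvC k) i1 j1 i2) acc
        = acc := by
    intro acc
    have hin : ∀ (acc : List (Int × Int × Int × Int)), ∀ j2 ∈ PySem.List.pyRange (j1 + m) (pvC k) 1,
        pvAJ2Body k (k.length : Int) (pvC k) i1 j1 i2 acc j2 = acc := by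
      intro acc j2 hmem
      rw [PySem.List.mem_pyRange_one] at hmem
      cases hX : (PySem.List.pyRange i1 (i2 + 1) 1).all (fun i =>
          (PySem.List.pyRange j1 (j2 + 1) 1).all (fun j =>
            pvCellA k (PySem.Int.mod i (k.length : Int)) (PySem.Int.mod j (pvC k)) == 1)) with
      | false => simp [pvAJ2Body, hX]
      | true =>
        exfalso
        rw [pvAllOnes_iff k i1 j1 i2 j2 hi10 hi12 hi2 hj10 (by omega) (by omega)] at hX
        have hup : j2 - j1 + 1 ≤ m := by
          rw [hm]
          rw [pvLe_foldl_min_iff]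
          exact ⟨by omega, fun i hi => by
            rw [PySem.List.mem_pyRange_one] at hi
            exact hX i hi.1 (by omega)⟩
        omega
    rw [PySem.List.foldl_congr_mem _ _ (fun acc _ => acc) _ (by intro a x hx; exact hin a x hx),
      PySem.List.foldl_ignore]
  rw [hsecond, hfirst]

lemma pvMain_loop (k : List (List Int)) (i1 j1 : Int)
    (hi10 : 0 ≤ i1) (hj10 : 0 ≤ j1) (hj1c : j1 < pvC k) :
    ∀ (n : Nat) (c m : Int), n = ((k.length : Int) - c).toNat → i1 ≤ c →
      m = (PySem.List.pyRange i1 c 1).foldl (fun a i => min a (pvCntI k i j1)) (pvC k) →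
      0 < m →
      ∀ acc, (PySem.List.pyRange c (k.length : Int) 1).foldl (pvAI2Body k (k.length : Int) (pvC k) i1 j1) acc
        = pvI2Loop (k.map (fun row => pvReachRow row (pvC k))) i1 j1
            (PySem.List.pyRange c (k.length : Int) 1) m acc := by
  intro n
  induction n with
  | zero =>
    intro c m hn hc hm hmpos acc
    have hle : (k.length : Int) ≤ c := by omega
    rw [PySem.List.pyRange_one_eq_nil hle]
    simp [pvI2Loop]
  | succ n ih =>
    intro c m hn hc hm hmpos acc
    have hcR : c < (k.length : Int) := by omega
    rw [PySem.List.pyRange_one_cons hcR]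
    have hlook : PySem.List.pyGetD
        (PySem.List.pyGetD (k.map fun row => pvReachRow row (pvC k)) c []) j1 0
          = pvCntI k c j1 := pvReach_lookup k c j1 (by omega) hcR hj10 hj1c
    have hcnt0 : 0 ≤ pvCntI k c j1 := by unfold pvCntI; exact Int.natCast_nonneg _
    have hm'inv : min m (pvCntI k c j1)
        = (PySem.List.pyRange i1 (c + 1) 1).foldl (fun a i => min a (pvCntI k i j1)) (pvC k) := by
      rw [PySem.List.pyRange_one_succ_right hc, List.foldl_append, ← hm]
      simp
    by_cases hz : min m (pvCntI k c j1) = 0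
    · have hzc : pvCntI k c j1 = 0 := by omega
      have hBside : pvI2Loop (k.map fun row => pvReachRow row (pvC k)) i1 j1
          (c :: PySem.List.pyRange (c + 1) (k.length : Int) 1) m acc = acc := by
        simp [pvI2Loop, hlook, hz]
      rw [hBside]
      refine pvA_dead k i1 j1 c (c :: PySem.List.pyRange (c + 1) (k.length : Int) 1)
        hi10 hj10 hj1c ?_ hc ?_ hzc acc
      · intro i2 hmem
        rcases List.mem_cons.mp hmem with h | h
        · omega
        · rw [PySem.List.mem_pyRange_one] at h; omega
      · intro i2 hmem
        rcases List.mem_cons.mp hmem with h | h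
        · omega
        · rw [PySem.List.mem_pyRange_one] at h; omega
    · have hm'pos : 0 < min m (pvCntI k c j1) := by omega
      have hstep : pvAI2Body k (k.length : Int) (pvC k) i1 j1 acc c
          = (PySem.List.pyRange j1 (j1 + min m (pvCntI k c j1)) 1).foldl
              (pvBJ2Body i1 j1 c) acc :=
        pvJ2Fold_eq k i1 j1 c (min m (pvCntI k c j1)) hi10 hc hcR hj10 hj1c hm'inv hm'pos acc
      rw [List.foldl_cons, hstep]
      have hBstep : pvI2Loop (k.map fun row => pvReachRow row (pvC k)) i1 j1
          (c :: PySem.List.pyRange (c + 1) (k.length : Int) 1) m acc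
          = pvI2Loop (k.map fun row => pvReachRow row (pvC k)) i1 j1
              (PySem.List.pyRange (c + 1) (k.length : Int) 1) (min m (pvCntI k c j1))
              ((PySem.List.pyRange j1 (j1 + min m (pvCntI k c j1)) 1).foldl
                (pvBJ2Body i1 j1 c) acc) := by
        simp only [pvI2Loop, hlook]
        rw [if_neg (by simpa using hz)]
      rw [hBstep]
      exact ih (c + 1) (min m (pvCntI k c j1)) (by omega) (by omega) hm'inv hm'pos _

lemma pvCell_inner (k : List (List Int)) (i1 j1 : Int)
    (hi10 : 0 ≤ i1) (hi1 : i1 < (k.length : Int)) (hj10 : 0 ≤ j1) (hj1c : j1 < pvC k) :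
    ∀ acc, pvAJ1Body k (k.length : Int) (pvC k) i1 acc j1
      = pvI2Loop (k.map (fun row => pvReachRow row (pvC k))) i1 j1
          (PySem.List.pyRange i1 (k.length : Int) 1) (pvC k) acc := by
  intro acc
  unfold pvAJ1Body
  by_cases hcell : (pvCellA k i1 j1 == 1) = true
  · rw [if_pos hcell]
    have h0 : (pvC k) = (PySem.List.pyRange i1 i1 1).foldl
        (fun a i => min a (pvCntI k i j1)) (pvC k) := by
      rw [PySem.List.pyRange_one_eq_nil (le_refl i1)]
      rfl
    exact pvMain_loop k i1 j1 hi10 hj10 hj1c ((k.length : Int) - i1).toNat i1 (pvC k)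
      rfl (le_refl i1) h0 (by omega) acc
  · rw [if_neg hcell]
    rw [PySem.List.pyRange_one_cons hi1]
    have hlook : PySem.List.pyGetD
        (PySem.List.pyGetD (k.map fun row => pvReachRow row (pvC k)) i1 []) j1 0
          = pvCntI k i1 j1 := pvReach_lookup k i1 j1 hi10 hi1 hj10 hj1c
    have hz : pvCntI k i1 j1 = 0 := by
      unfold pvCntI
      have hne : ((k.getD i1.toNat []).getD j1.toNat 0) ≠ 1 := by
        rw [← pvCellA_eq k i1 j1 hi10 hj10]
        simpa using hcell
      have hC' : j1.toNat + 0 < (k.getD 0 []).length := by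
        have : j1 < pvC k := hj1c
        simp only [pvC] at this
        omega
      have := pvGetD_dropTake (k.getD i1.toNat []) (k.getD 0 []).length j1.toNat 0 hC'
      rw [pvCnt_zero_of_head _ (by rw [this]; simpa using hne)]
      rfl
    have hmin : min (pvC k) (pvCntI k i1 j1) = 0 := by
      have : 0 ≤ pvC k := by unfold pvC; positivity
      omega
    simp [pvI2Loop, hlook, hmin]

lemma pvGroups_eq (k : List (List Int)) :
    (PySem.List.pyRange 0 (k.length : Int) 1).foldl (fun acc i1 =>
        (PySem.List.pyRange 0 (pvC k) 1).foldl (pvAJ1Body k (k.length : Int) (pvC k) i1) acc) []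
      = (PySem.List.pyRange 0 (k.length : Int) 1).foldl (fun acc i1 =>
        (PySem.List.pyRange 0 (pvC k) 1).foldl (fun acc j1 =>
          pvI2Loop (k.map (fun row => pvReachRow row (pvC k))) i1 j1
            (PySem.List.pyRange i1 (k.length : Int) 1) (pvC k) acc) acc) [] := by
  apply PySem.List.foldl_congr_mem
  intro acc i1 hi1mem
  apply PySem.List.foldl_congr_mem
  intro acc2 j1 hj1mem
  rw [PySem.List.mem_pyRange_one] at hi1mem hj1mem
  exact pvCell_inner k i1 j1 hi1mem.1 hi1mem.2 hj1mem.1 hj1mem.2 acc2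

lemma pvFilter_eq (gs : List (Int × Int × Int × Int)) :
    gs.foldl (fun acc g =>
      let is_maximal := !(gs.any (fun o =>
        decide (g.1 ≥ o.1) && decide (g.2.1 ≥ o.2.1) && decide (g.2.2.1 ≤ o.2.2.1) &&
        decide (g.2.2.2 ≤ o.2.2.2) &&
        (g.1 != o.1 || g.2.1 != o.2.1 || g.2.2.1 != o.2.2.1 || g.2.2.2 != o.2.2.2)))
      if is_maximal then acc ++ [g] else acc) []
    = gs.foldl (fun acc g =>
      if gs.any (fun o =>
          decide (o.1 ≤ g.1) && decide (o.2.1 ≤ g.2.1) && decide (g.2.2.1 ≤ o.2.2.1) &&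
          decide (g.2.2.2 ≤ o.2.2.2) && (o != g))
      then acc
      else acc ++ [g]) [] := by
  apply PySem.List.foldl_congr_mem
  intro acc g _
  have hany : (gs.any (fun o =>
        decide (g.1 ≥ o.1) && decide (g.2.1 ≥ o.2.1) && decide (g.2.2.1 ≤ o.2.2.1) &&
        decide (g.2.2.2 ≤ o.2.2.2) &&
        (g.1 != o.1 || g.2.1 != o.2.1 || g.2.2.1 != o.2.2.1 || g.2.2.2 != o.2.2.2)))
      = (gs.any (fun o =>
        decide (o.1 ≤ g.1) && decide (o.2.1 ≤ g.2.1) && decide (g.2.2.1 ≤ o.2.2.1) &&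
        decide (g.2.2.2 ≤ o.2.2.2) && (o != g))) := by
    refine PySem.List.any_congr_mem ?_
    intro o _
    obtain ⟨a, b, c, d⟩ := g
    obtain ⟨a', b', c', d'⟩ := o
    rw [Bool.eq_iff_iff]
    simp [Prod.ext_iff, ge_iff_le]
    omega
  rw [hany]
  cases hb : (gs.any (fun o =>
        decide (o.1 ≤ g.1) && decide (o.2.1 ≤ g.2.1) && decide (g.2.2.1 ≤ o.2.2.1) &&
        decide (g.2.2.2 ≤ o.2.2.2) && (o != g))) <;> simp [hb]

-- ===== VERDICT (by name: the statement is the Claim_ definition above) =====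
theorem find_karnaugh_groups_spec : Claim_equal_find_karnaugh_groups := by
  intro k _hdom _hpre
  unfold Spec_find_karnaugh_groups find_karnaugh_groups find_karnaugh_groups_alt
  cases k with
  | nil => rfl
  | cons r t =>
    have hne : ((((r :: t).length : Int)) == 0) = false := by
      simp
      omega
    simp only [hne, Bool.false_eq_true, if_false]
    have hcol : ((PySem.List.pyGetD (r :: t) 0 ([] : List Int)).length : Int) = pvC (r :: t) := by
      simp [pvC, PySem.List.pyGetD_zero]
    rw [hcol, pvGroups_eq (r :: t), pvFilter_eq]
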